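-- pv_equiv track=rewrite | github.com/Intelligent-Container/Intelligent-Container-System | 2K1000/control_system/export_data.py | get_max_col
-- ===== SOURCE A (Python) =====
-- def get_max_col(max_list):
--     line_list = []
--     # i表示行，j表示列
--     for j in range(len(max_list[0])):
--         line_num = []
--         for i in range(len(max_list)):
--             line_num.append(max_list[i][j])# 将每列的宽度存入line_num
--         line_list.append((max(line_num)))# 将每列最大宽度存入line_list
--     return line_list
-- ===== SOURCE B (Python) =====
-- def get_max_col(max_list):
--     result = list(max_list[0])
--     for row in max_list[1:]:
--         result = [max(m, x) for m, x in zip(result, row)]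
--     return result
-- ===== Notes on version B (the rewrite author's own statement) =====
-- stated objective: simpler
-- what changed: Replaces the column-gathering nested loops (materialise each column, then max it) with a single row-major pass keeping a running per-column maximum accumulator updated by zip.
import Mathlib
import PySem

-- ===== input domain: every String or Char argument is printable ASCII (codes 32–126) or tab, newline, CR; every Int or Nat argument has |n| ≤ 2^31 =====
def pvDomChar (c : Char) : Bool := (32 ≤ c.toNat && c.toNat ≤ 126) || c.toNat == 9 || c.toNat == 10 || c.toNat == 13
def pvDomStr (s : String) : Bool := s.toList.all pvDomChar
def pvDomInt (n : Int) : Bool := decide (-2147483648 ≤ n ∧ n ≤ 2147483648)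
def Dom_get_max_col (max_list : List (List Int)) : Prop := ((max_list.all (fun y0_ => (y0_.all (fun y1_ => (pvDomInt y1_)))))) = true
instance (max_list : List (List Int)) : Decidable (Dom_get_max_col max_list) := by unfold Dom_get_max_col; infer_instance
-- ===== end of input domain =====

-- B replaces A's column-gathering nested loops by a single row-major pass keeping a
-- running per-column maximum accumulator (simpler; same asymptotic cost).


-- ===== PORT A =====
-- for j in range(len(max_list[0])): gather column j into line_num, append max(line_num)
def get_max_col (max_list : List (List Int)) : List Int :=
  (PySem.List.pyRange 0 (PySem.List.len (PySem.List.pyGetD max_list 0 []))).foldl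
    (fun line_list j =>
      let line_num := (PySem.List.pyRange 0 (PySem.List.len max_list)).foldl
        (fun acc i => acc ++ [PySem.List.pyGetD (PySem.List.pyGetD max_list i []) j 0]) []
      line_list ++ [(PySem.List.max? line_num id).getD 0]) []

-- ===== PORT B =====
-- result = list(max_list[0]); for row in max_list[1:]: result = [max(m,x) for m,x in zip(result,row)]
def get_max_col_alt (max_list : List (List Int)) : List Int :=
  match max_list with
  | [] => []   -- Python raises IndexError here; excluded by Pre_
  | r0 :: rest =>
    rest.foldl (fun result row => (result.zip row).map (fun p => max p.1 p.2)) r0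

-- ===== PRECONDITION & SPEC =====
-- Pre_ excludes exactly the inputs where A raises IndexError: the empty matrix, and
-- ragged matrices in which some row is shorter than the first row.
def Pre_get_max_col (max_list : List (List Int)) : Prop :=
  max_list ≠ [] ∧ ∀ row ∈ max_list, (max_list.headD []).length ≤ row.length
instance (max_list : List (List Int)) : Decidable (Pre_get_max_col max_list) := by
  unfold Pre_get_max_col; infer_instance

def pvWitness_get_max_col : List (List Int) := [[1, 5, 2], [4, 0, 3]]

def Spec_get_max_col (max_list : List (List Int)) (out : List Int) : Prop := out = get_max_col_alt max_list
instance (max_list : List (List Int)) (out : List Int) : Decidable (Spec_get_max_col max_list out) := by unfold Spec_get_max_col; infer_instance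

-- ===== CLAIM (what is proved, stated in full; the proofs are below) =====
def Claim_equal_get_max_col : Prop := ∀ (max_list : List (List Int)), Dom_get_max_col max_list → Pre_get_max_col max_list → Spec_get_max_col max_list (get_max_col max_list)

-- ===== LEMMAS AND PROOFS =====

-- max? with identity key on a nonempty list is the left fold of max
-- max? with identity key on a nonempty list is the left fold of max
lemma max?_cons_fold (x : Int) (xs : List Int) :
    PySem.List.max? (x :: xs) id = some (xs.foldl max x) := by
  induction xs generalizing x with
  | nil => rfl
  | cons y ys ih =>
    have h1 : PySem.List.max? (x :: y :: ys) id = PySem.List.max? (max x y :: ys) id := by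
      unfold PySem.List.max?
      simp only [List.foldl_cons, id_eq]
      rcases lt_or_ge x y with h | h
      · rw [if_pos h, max_eq_right h.le]
      · rw [if_neg (not_lt.mpr h), max_eq_left h]
    rw [h1, ih, List.foldl_cons]

-- A in normal form: one running fold per column index
lemma A_eq (r0 : List Int) (rest : List (List Int)) :
    get_max_col (r0 :: rest) =
      (List.range r0.length).map (fun (j : Nat) =>
        rest.foldl (fun m row => max m (PySem.List.pyGetD row ((j : Nat) : Int) 0)) (r0.getD j 0)) := by
  unfold get_max_col
  have h0 : PySem.List.pyGetD (r0 :: rest) 0 [] = r0 := by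
    have := PySem.List.pyGetD_natCast (r0 :: rest) 0 []
    simp only [Nat.cast_zero] at this; exact this
  rw [h0]
  have hlen : PySem.List.len r0 = ((r0.length : Nat) : Int) := by
    simp [PySem.List.len_eq]
  rw [hlen, PySem.List.pyRange_zero_nat]
  rw [PySem.List.foldl_append_singleton_eq_map, List.nil_append, List.map_map]
  refine List.map_congr_left ?_
  intro j _
  simp only [Function.comp]
  rw [PySem.List.foldl_pyRange_zero_pyGetD (r0 :: rest) []
        (fun acc row => acc ++ [PySem.List.pyGetD row (j : Int) 0]) []]
  rw [PySem.List.foldl_append_singleton_eq_map, List.nil_append, List.map_cons]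
  rw [max?_cons_fold, Option.getD_some, List.foldl_map]
  rw [PySem.List.pyGetD_natCast]

-- B's accumulator fold in the same normal form
lemma B_eq (rest : List (List Int)) : ∀ (res : List Int),
    (∀ row ∈ rest, res.length ≤ row.length) →
    rest.foldl (fun result row => (result.zip row).map (fun p => max p.1 p.2)) res =
      (List.range res.length).map (fun (j : Nat) =>
        rest.foldl (fun m row => max m (PySem.List.pyGetD row ((j : Nat) : Int) 0)) (res.getD j 0)) := by
  induction rest with
  | nil =>
    intro res _
    apply List.ext_getElem
    · simp
    · intro i h1 h2
      simp at h2
      simp [h2, List.getD_eq_getElem?_getD]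
  | cons row rest ih =>
    intro res h
    have hrow : res.length ≤ row.length := h row (List.mem_cons_self ..)
    have hlen : ((res.zip row).map (fun p => max p.1 p.2)).length = res.length := by
      simp [Nat.min_eq_left hrow]
    simp only [List.foldl_cons]
    rw [ih _ (by intro r hr; rw [hlen]; exact h r (List.mem_cons_of_mem _ hr)), hlen]
    refine List.map_congr_left ?_
    intro j hj
    rw [List.mem_range] at hj
    congr 1
    have hjz : j < (res.zip row).length := by simp [Nat.min_eq_left hrow]; omega
    rw [List.getD_eq_getElem?_getD, List.getElem?_eq_getElem (by simpa using hjz),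
        List.getElem_map, List.getElem_zip]
    rw [PySem.List.pyGetD_natCast, List.getD_eq_getElem?_getD,
        List.getElem?_eq_getElem hj, List.getD_eq_getElem?_getD,
        List.getElem?_eq_getElem (by omega : j < row.length)]
    simp

-- ===== VERDICT (by name: the statement is the Claim_ definition above) =====
theorem get_max_col_spec : Claim_equal_get_max_col := by
  intro ml _ hpre
  obtain ⟨hne, hrows⟩ := hpre
  cases ml with
  | nil => exact absurd rfl hne
  | cons r0 rest =>
    show get_max_col (r0 :: rest) = get_max_col_alt (r0 :: rest)
    simp only [get_max_col_alt]
    rw [A_eq, B_eq rest r0 (fun row hr => hrows row (List.mem_cons_of_mem _ hr))]
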